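-- pv_equiv track=rewrite | github.com/Egorrr1613/lambdaBrain | 28_task/7.py | is_in_str
-- ===== SOURCE A (Python) =====
-- def is_in_str(string_for_search: str, word: str, current_index: int, index_word: int) -> bool:
--     if index_word == len(word) and (
--             current_index > len(string_for_search) - 1 or string_for_search[current_index] == " "
--     ):
--         return True
--     if index_word == len(word) or current_index == len(string_for_search):
--         return False
--     if string_for_search[current_index] == word[index_word]:
--         index_word += 1
--     else:
--         index_word = 0
--     current_index += 1
--     return is_in_str(string_for_search, word, current_index, index_word)
-- ===== SOURCE B (Python) =====
-- def is_in_str(string_for_search: str, word: str, current_index: int, index_word: int) -> bool: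
--     n = len(string_for_search)
--     m = len(word)
--     k = index_word
--     for i in range(current_index, n):
--         if k == m:
--             return string_for_search[i] == " "
--         k = k + 1 if string_for_search[i] == word[k] else 0
--     return k == m
-- ===== Notes on version B (the rewrite author's own statement) =====
-- stated objective: idiomatic
-- what changed: Replaced the tail recursion (one Python call frame per scanned character, bounded by the recursion limit) by a single for-loop over range(current_index, len(s)) carrying only the match counter, with the three-guard early-return chain folded into one in-loop boundary check and one after-loop check.
import Mathlib
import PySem

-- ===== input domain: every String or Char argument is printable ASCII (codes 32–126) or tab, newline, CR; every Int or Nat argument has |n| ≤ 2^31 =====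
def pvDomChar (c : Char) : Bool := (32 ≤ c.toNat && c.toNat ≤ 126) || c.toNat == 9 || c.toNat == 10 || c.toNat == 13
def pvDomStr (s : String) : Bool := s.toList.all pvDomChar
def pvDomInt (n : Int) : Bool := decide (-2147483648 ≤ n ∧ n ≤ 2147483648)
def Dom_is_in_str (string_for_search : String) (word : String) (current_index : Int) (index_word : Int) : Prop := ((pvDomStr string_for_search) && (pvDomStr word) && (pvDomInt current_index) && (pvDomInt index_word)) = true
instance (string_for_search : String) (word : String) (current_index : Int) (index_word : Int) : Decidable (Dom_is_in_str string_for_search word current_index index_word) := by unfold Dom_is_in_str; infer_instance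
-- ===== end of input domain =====

-- B replaces A's tail recursion (one call frame per character) by a single for-loop over
-- range(current_index, len(s)) carrying only the match counter (idiomatic, O(1) space).


-- used by the port's decreasing_by: a successful index access means the index is below the length
theorem pyGet?_some_lt (s : String) (i : Int) (c : Char) (h : PySem.Str.pyGet? s i = some c) :
    i < (s.length : Int) := by
  by_contra hlt
  rw [show PySem.Str.pyGet? s i = PySem.List.pyGet? s.toList i from by simp [PySem.Str.pyGet?],
    (PySem.List.pyGet?_eq_none_iff s.toList i).2
      (by simp [PySem.Raise.InRange, String.length_toList]; omega)] at h
  simp at h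

-- ===== PORT A =====
-- literal transliteration of A's tail recursion; the `none` match arms are Python's IndexError
-- (excluded by Pre_is_in_str)
def is_in_str (string_for_search : String) (word : String) (current_index : Int) (index_word : Int) : Bool :=
  if index_word = PySem.Str.len word ∧
      (current_index > PySem.Str.len string_for_search - 1 ∨
       PySem.Str.pyGet? string_for_search current_index = some ' ') then
    true
  else if index_word = PySem.Str.len word ∨ current_index = PySem.Str.len string_for_search then
    false
  else
    match hc : PySem.Str.pyGet? string_for_search current_index,
          PySem.Str.pyGet? word index_word with
    | some c, some d =>
        is_in_str string_for_search word (current_index + 1)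
          (if c = d then index_word + 1 else 0)
    | _, _ => false  -- IndexError
termination_by ((PySem.Str.len string_for_search) - current_index).toNat
decreasing_by
  have := pyGet?_some_lt string_for_search current_index _ hc
  simp only [PySem.Str.len_eq] at *
  rw [String.length_toList] at *
  omega

-- ===== PORT B =====
-- the for-loop body of Source B, one step per remaining index i of range(current_index, n)
def isInStrLoop (string_for_search : String) (word : String) (m : Int) : List Int → Int → Bool
  | [], k => decide (k = m)
  | i :: rest, k =>
      if k = m then decide (PySem.Str.pyGet? string_for_search i = some ' ')
      else isInStrLoop string_for_search word m rest
        (if PySem.Str.pyGet? string_for_search i = PySem.Str.pyGet? word k then k + 1 else 0)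

def is_in_str_alt (string_for_search : String) (word : String) (current_index : Int) (index_word : Int) : Bool :=
  isInStrLoop string_for_search word (PySem.Str.len word)
    (PySem.List.pyRange current_index (PySem.Str.len string_for_search)) index_word

-- ===== PRECONDITION & SPEC =====
-- Pre_ is exactly the set of inputs on which A returns (elsewhere A raises IndexError or
-- RecursionError): both start offsets in Python's legal index window (negative = from the end),
-- or current_index already == / past the end where no character is ever accessed.
def Pre_is_in_str (string_for_search : String) (word : String) (current_index : Int) (index_word : Int) : Prop :=
  current_index = (string_for_search.toList.length : Int) ∨
  ((string_for_search.toList.length : Int) ≤ current_index ∧ index_word = (word.toList.length : Int)) ∨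
  (-(string_for_search.toList.length : Int) ≤ current_index ∧ current_index ≤ (string_for_search.toList.length : Int) ∧
   -(word.toList.length : Int) ≤ index_word ∧ index_word ≤ (word.toList.length : Int))
instance (string_for_search : String) (word : String) (current_index : Int) (index_word : Int) : Decidable (Pre_is_in_str string_for_search word current_index index_word) := by unfold Pre_is_in_str; infer_instance

def pvWitness_is_in_str : String × String × Int × Int := ("no way out", "way", 0, 0)

def Spec_is_in_str (string_for_search : String) (word : String) (current_index : Int) (index_word : Int) (out : Bool) : Prop := out = is_in_str_alt string_for_search word current_index index_word
instance (string_for_search : String) (word : String) (current_index : Int) (index_word : Int) (out : Bool) : Decidable (Spec_is_in_str string_for_search word current_index index_word out) := by unfold Spec_is_in_str; infer_instance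

-- ===== CLAIM (what is proved, stated in full; the proofs are below) =====
def Claim_equal_is_in_str : Prop := ∀ (string_for_search : String) (word : String) (current_index : Int) (index_word : Int), Dom_is_in_str string_for_search word current_index index_word → Pre_is_in_str string_for_search word current_index index_word → Spec_is_in_str string_for_search word current_index index_word (is_in_str string_for_search word current_index index_word)

-- ===== LEMMAS AND PROOFS =====

theorem pyGet?_some_of_range (s : String) (i : Int) (h1 : -(s.length : Int) ≤ i)
    (h2 : i < (s.length : Int)) : ∃ c, PySem.Str.pyGet? s i = some c := by
  cases hc : PySem.Str.pyGet? s i with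
  | some c => exact ⟨c, rfl⟩
  | none =>
    exfalso
    rw [show PySem.Str.pyGet? s i = PySem.List.pyGet? s.toList i from by simp [PySem.Str.pyGet?],
      PySem.List.pyGet?_eq_none_iff] at hc
    exact hc (by simp [PySem.Raise.InRange, String.length_toList]; omega)

theorem pyGet?_none_of_ge (s : String) (i : Int) (h : (s.length : Int) ≤ i) :
    PySem.Str.pyGet? s i = none := by
  rw [show PySem.Str.pyGet? s i = PySem.List.pyGet? s.toList i from by simp [PySem.Str.pyGet?],
    PySem.List.pyGet?_eq_none_iff]
  simp [PySem.Raise.InRange, String.length_toList]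
  omega

-- when current_index is at or past the end both sides return (index_word == len(word))
theorem eq_alt_of_ge (s w : String) (ci iw : Int) (hn : (s.length : Int) ≤ ci) :
    is_in_str s w ci iw = is_in_str_alt s w ci iw := by
  rw [is_in_str, is_in_str_alt]
  rw [show PySem.List.pyRange ci (PySem.Str.len s) = [] from by
    simp [PySem.List.pyRange_one, PySem.Str.len_eq, String.length_toList]; omega]
  simp only [isInStrLoop, PySem.Str.len_eq, String.length_toList]
  by_cases hiw : iw = (w.length : Int)
  · simp [hiw]; omega
  · by_cases hci : ci = (s.length : Int)
    · simp [hiw, hci]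
    · rw [if_neg (by tauto), if_neg (by tauto)]
      split
      · next c d hc _ =>
          rw [pyGet?_none_of_ge s ci hn] at hc
          exact absurd hc (by simp)
      · simp [hiw]

-- main equivalence, by induction on the number of characters left to scan
theorem eq_alt_of_box (s w : String) : ∀ (fuel : Nat) (ci iw : Int),
    (s.length : Int) - ci ≤ (fuel : Int) →
    -(s.length : Int) ≤ ci → -(w.length : Int) ≤ iw → iw ≤ (w.length : Int) →
    is_in_str s w ci iw = is_in_str_alt s w ci iw := by
  intro fuel
  induction fuel with
  | zero => intro ci iw hf _ _ _; exact eq_alt_of_ge s w ci iw (by omega)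
  | succ fuel ih =>
    intro ci iw hf hci hiw1 hiw2
    by_cases hn : (s.length : Int) ≤ ci
    · exact eq_alt_of_ge s w ci iw hn
    · rw [not_le] at hn
      obtain ⟨c, hc⟩ := pyGet?_some_of_range s ci hci hn
      rw [is_in_str, is_in_str_alt]
      rw [show PySem.List.pyRange ci (PySem.Str.len s)
            = ci :: PySem.List.pyRange (ci + 1) (PySem.Str.len s) from by
        rw [PySem.Str.len_eq]
        exact PySem.List.pyRange_one_cons (by rw [String.length_toList] at *; omega)]
      simp only [isInStrLoop, PySem.Str.len_eq, String.length_toList]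
      have hcL : PySem.List.pyGet? s.toList ci = some c := by
        simpa [PySem.Str.pyGet?] using hc
      by_cases hiw : iw = (w.length : Int)
      · -- word fully matched: both return whether s[ci] is a space
        have h1 : ¬ (ci > (s.length : Int) - 1) := by omega
        by_cases hsp : PySem.Str.pyGet? s ci = some ' '
        · have hspL : PySem.List.pyGet? s.toList ci = some ' ' := by
            simpa [PySem.Str.pyGet?] using hsp
          simp [hiw, hspL]
        · have hspL : ¬ PySem.List.pyGet? s.toList ci = some ' ' := by
            simpa [PySem.Str.pyGet?] using hsp
          rw [if_neg (by exact fun ⟨_, hor⟩ => hor.elim h1 hsp),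
            if_pos (Or.inl hiw), if_pos hiw]
          simp [hspL]
      · -- still matching: one identical step, then the induction hypothesis
        have hlt : iw < (w.length : Int) := lt_of_le_of_ne hiw2 hiw
        obtain ⟨d, hd⟩ := pyGet?_some_of_range w iw hiw1 hlt
        have h2 : ci ≠ (s.length : Int) := by omega
        rw [if_neg (by exact fun ⟨h, _⟩ => hiw h),
          if_neg (by exact fun h => h.elim hiw h2), if_neg hiw]
        split
        · next c' d' hc' hd' =>
            rw [hc] at hc'; rw [hd] at hd'
            cases hc'; cases hd'
            rw [hc, hd]
            have step : ∀ k, -(w.length : Int) ≤ k → k ≤ (w.length : Int) →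
                is_in_str s w (ci + 1) k
                  = isInStrLoop s w (↑w.length) (PySem.List.pyRange (ci + 1) ↑s.length) k := by
              intro k hk1 hk2
              rw [ih (ci + 1) k (by omega) (by omega) hk1 hk2, is_in_str_alt,
                PySem.Str.len_eq, String.length_toList, PySem.Str.len_eq, String.length_toList]
            by_cases hcd : c = d
            · rw [if_pos hcd, if_pos (by rw [hcd])]
              exact step (iw + 1) (by omega) (by omega)
            · rw [if_neg hcd, if_neg (by simpa using hcd)]
              exact step 0 (by omega) (by omega)
        · next h =>
            exact (h c d hc hd).elim

-- ===== VERDICT (by name: the statement is the Claim_ definition above) =====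
theorem is_in_str_spec : Claim_equal_is_in_str := by
  intro s w ci iw _ hpre
  unfold Spec_is_in_str
  unfold Pre_is_in_str at hpre
  rw [String.length_toList, String.length_toList] at hpre
  rcases hpre with h | ⟨h1, h2⟩ | ⟨h1, h2, h3, h4⟩
  · exact eq_alt_of_ge s w ci iw (by omega)
  · exact eq_alt_of_ge s w ci iw h1
  · exact eq_alt_of_box s w ((s.length : Int) - ci).toNat ci iw (by omega) h1 h3 h4
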